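-- pv_equiv track=rewrite | github.com/kocory1/AutoPolio | src/service/github_embedding/paths.py | collect_parent_directories
-- ===== SOURCE A (Python) =====
-- from typing import Iterable
--
-- def _folder_chain_shallow_to_deepest(repo_rel_path: str) -> list[str]:
--     """
--     파일의 레포 상대 경로에 대해, 직계~최심 부모 디렉터리 경로를 얕은 순으로 반환.
--
--     예: ``src/auth/login.py`` → ``["src", "src/auth"]``
--     """
--     p = repo_rel_path.strip().strip("/")
--     if not p or "/" not in p:
--         return []
--
--     segments = p.split("/")
--     if len(segments) < 2:
--         return []
--
--     out: list[str] = []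
--     for i in range(1, len(segments)):
--         out.append("/".join(segments[:i]))
--     return out
--
-- def collect_parent_directories(repo_rel_paths: Iterable[str]) -> set[str]:
--     """여러 파일 경로에서 등장하는 모든 부모 디렉터리 경로 집합."""
--     folders: set[str] = set()
--     for rp in repo_rel_paths:
--         if rp == "/" or not rp.strip():
--             continue
--         for d in _folder_chain_shallow_to_deepest(rp):
--             folders.add(d)
--     return folders
-- ===== SOURCE B (Python) =====
-- from typing import Iterable
--
-- def collect_parent_directories(repo_rel_paths: Iterable[str]) -> set[str]:
--     """Single char-scan per path: each '/' in the cleaned path marks the end of a parent prefix."""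
--     folders: set[str] = set()
--     for rp in repo_rel_paths:
--         p = rp.strip().strip("/")
--         for j, ch in enumerate(p):
--             if ch == "/":
--                 folders.add(p[:j])
--     return folders
-- ===== Notes on version B (the rewrite author's own statement) =====
-- stated objective: simpler
-- what changed: B drops the helper function and the redundant skip guard and replaces split-into-segments plus repeated '/'.join(segments[:i]) re-joining by a single character scan of each cleaned path that adds the prefix p[:j] at every '/'.
import Mathlib
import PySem

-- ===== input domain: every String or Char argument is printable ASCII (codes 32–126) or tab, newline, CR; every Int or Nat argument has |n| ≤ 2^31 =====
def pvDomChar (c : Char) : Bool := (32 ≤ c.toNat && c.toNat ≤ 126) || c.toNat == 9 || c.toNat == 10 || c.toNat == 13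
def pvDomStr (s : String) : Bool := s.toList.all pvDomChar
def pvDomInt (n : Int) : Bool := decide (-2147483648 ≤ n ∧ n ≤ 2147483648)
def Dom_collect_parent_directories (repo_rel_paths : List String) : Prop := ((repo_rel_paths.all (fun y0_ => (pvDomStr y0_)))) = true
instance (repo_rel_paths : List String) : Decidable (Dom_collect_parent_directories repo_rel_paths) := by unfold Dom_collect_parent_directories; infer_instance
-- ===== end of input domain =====

-- B drops the helper and skip guard and emits each parent prefix during a single character
-- scan of the cleaned path instead of splitting into segments and re-joining slices (objective: simpler).

-- ===== PORT A =====
def pvFolderChain (repo_rel_path : String) : List String :=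
  let p := PySem.Str.stripChars (PySem.Str.strip repo_rel_path) "/"
  if p = "" ∨ PySem.Str.isIn "/" p = false then []
  else
    -- sep "/" is nonempty, so p.split("/") never raises: split? is always `some`
    let segments := (PySem.Str.split? p "/").getD []
    if segments.length < 2 then []
    else (PySem.List.pyRange 1 (segments.length : Int)).foldl
      (fun out i => out ++ [PySem.Str.join "/" (PySem.List.slice segments none (some i))]) []

def collect_parent_directories (repo_rel_paths : List String) : List String :=
  repo_rel_paths.foldl
    (fun folders rp =>
      if rp = "/" ∨ PySem.Str.strip rp = "" then folders
      else (pvFolderChain rp).foldl PySem.Set.add folders)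
    PySem.Set.empty


-- ===== PORT B =====
def collect_parent_directories_alt (repo_rel_paths : List String) : List String :=
  repo_rel_paths.foldl
    (fun folders rp =>
      let p := PySem.Str.stripChars (PySem.Str.strip rp) "/"
      (PySem.List.enumerate p.toList).foldl
        (fun fs jc =>
          if jc.2 = '/' then PySem.Set.add fs (PySem.Str.slice p none (some jc.1)) else fs)
        folders)
    PySem.Set.empty


-- ===== PRECONDITION & SPEC =====
def Spec_collect_parent_directories (repo_rel_paths : List String) (out : List String) : Prop := out = collect_parent_directories_alt repo_rel_paths
instance (repo_rel_paths : List String) (out : List String) : Decidable (Spec_collect_parent_directories repo_rel_paths out) := by unfold Spec_collect_parent_directories; infer_instance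

-- ===== CLAIM (what is proved, stated in full; the proofs are below) =====
def Claim_equal_collect_parent_directories : Prop := ∀ (repo_rel_paths : List String), Dom_collect_parent_directories repo_rel_paths → Spec_collect_parent_directories repo_rel_paths (collect_parent_directories repo_rel_paths)

-- ===== LEMMAS AND PROOFS =====

-- structural version of p.split("/")
def pvSplit : List Char → List (List Char)
  | [] => [[]]
  | c :: t =>
    if c = '/' then [] :: pvSplit t
    else match pvSplit t with
         | [] => [[c]]
         | h :: r => (c :: h) :: r
def pvPfx : List Char → List (List Char)
  | [] => []
  | c :: t => (if c = '/' then [[]] else []) ++ (pvPfx t).map (c :: ·)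

theorem pvSplit_ne_nil (cs : List Char) : pvSplit cs ≠ [] := by
  cases cs with
  | nil => simp [pvSplit]
  | cons c t =>
    simp only [pvSplit]
    split
    · simp
    · split <;> simp_all

theorem pvGo_spec (fuel : Nat) : ∀ (l cur : List Char) (acc : List (List Char)),
    l.length < fuel →
    PySem.Chars.splitOn.go ['/'] fuel l cur acc =
      acc.reverse ++ (match pvSplit l with
                      | [] => []
                      | h :: r => (cur.reverse ++ h) :: r) := by
  induction fuel with
  | zero => intro l cur acc h; omega
  | succ f ih =>
    intro l cur acc h
    cases l with
    | nil => simp [PySem.Chars.splitOn.go, pvSplit]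
    | cons c rest =>
      by_cases hc : c = '/'
      · subst hc
        rw [PySem.Chars.splitOn.go]
        simp only [List.isPrefixOf, BEq.rfl, Bool.true_and, if_pos, List.length_cons,
          List.length_nil, List.drop_succ_cons, List.drop_zero]
        rw [ih rest [] _ (by simpa using Nat.lt_of_succ_lt_succ h)]
        obtain ⟨hh, r, hr⟩ : ∃ hh r, pvSplit rest = hh :: r := by
          cases e : pvSplit rest with
          | nil => exact absurd e (pvSplit_ne_nil rest)
          | cons a b => exact ⟨a, b, rfl⟩
        simp [pvSplit, hr]
      · rw [PySem.Chars.splitOn.go]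
        have hpre : ['/'].isPrefixOf (c :: rest) = false := by
          simp [List.isPrefixOf]; exact fun h' => absurd h'.symm hc
        simp only [hpre, if_neg, Bool.false_eq_true, not_false_eq_true]
        rw [ih rest (c :: cur) _ (by simpa using Nat.lt_of_succ_lt_succ h)]
        obtain ⟨hh, r, hr⟩ : ∃ hh r, pvSplit rest = hh :: r := by
          cases e : pvSplit rest with
          | nil => exact absurd e (pvSplit_ne_nil rest)
          | cons a b => exact ⟨a, b, rfl⟩
        simp [pvSplit, hr, hc]

theorem pvSplitOn_single (cs : List Char) : PySem.Chars.splitOn cs ['/'] = pvSplit cs := by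
  rw [PySem.Chars.splitOn, pvGo_spec (cs.length + 1) cs [] [] (by omega)]
  obtain ⟨hh, r, hr⟩ : ∃ hh r, pvSplit cs = hh :: r := by
    cases e : pvSplit cs with
    | nil => exact absurd e (pvSplit_ne_nil cs)
    | cons a b => exact ⟨a, b, rfl⟩
  simp [hr]

theorem pvPfx_nil_of_not_mem {cs : List Char} (h : '/' ∉ cs) : pvPfx cs = [] := by
  induction cs with
  | nil => rfl
  | cons c t ih =>
    simp only [List.mem_cons, not_or] at h
    simp [pvPfx, Ne.symm h.1, ih h.2]

theorem pvSplit_two_le {cs : List Char} (h : '/' ∈ cs) : 2 ≤ (pvSplit cs).length := by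
  induction cs with
  | nil => simp at h
  | cons c t ih =>
    by_cases hc : c = '/'
    · subst hc
      have := pvSplit_ne_nil t
      simp only [pvSplit, if_pos]
      cases e : pvSplit t with
      | nil => exact absurd e (pvSplit_ne_nil t)
      | cons a b => simp
    · have ht : '/' ∈ t := by
        rcases List.mem_cons.mp h with h1 | h1
        · exact absurd h1.symm hc
        · exact h1
      have h2 := ih ht
      simp only [pvSplit, hc, if_neg, not_false_eq_true, if_false]
      cases e : pvSplit t with
      | nil => exact absurd e (pvSplit_ne_nil t)
      | cons a b => rw [e] at h2; simpa using h2

theorem pvFoldl_append_sing {α β : Type} (l : List α) (acc : List β) (f : α → β) :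
    l.foldl (fun out i => out ++ [f i]) acc = acc ++ l.map f := by
  induction l generalizing acc with
  | nil => simp
  | cons x xs ih => simp [List.foldl_cons, ih]

theorem pvJoin_cons_head (c : Char) (h : List Char) (m : List (List Char)) :
    PySem.Chars.join ['/'] ((c :: h) :: m) = c :: PySem.Chars.join ['/'] (h :: m) := by
  cases m with
  | nil => simp [PySem.Chars.join, List.intercalate]
  | cons b l => simp [PySem.Chars.join, List.intercalate, List.intersperse]

theorem pvJoin_nil_cons (b : List Char) (l : List (List Char)) :
    PySem.Chars.join ['/'] ([] :: b :: l) = '/' :: PySem.Chars.join ['/'] (b :: l) := by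
  simp [PySem.Chars.join, List.intercalate, List.intersperse]

theorem pvRangeJoin_eq_pfx (cs : List Char) :
    (List.range ((pvSplit cs).length - 1)).map
      (fun k => PySem.Chars.join ['/'] ((pvSplit cs).take (k+1))) = pvPfx cs := by
  induction cs with
  | nil => simp [pvSplit, pvPfx]
  | cons c t ih =>
    by_cases hc : c = '/'
    · subst hc
      obtain ⟨hh, r, hr⟩ : ∃ hh r, pvSplit t = hh :: r := by
        cases e : pvSplit t with
        | nil => exact absurd e (pvSplit_ne_nil t)
        | cons a b => exact ⟨a, b, rfl⟩
      simp only [pvSplit, if_pos, pvPfx, hr]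
      rw [show ([] :: hh :: r).length - 1 = ((hh :: r).length - 1) + 1 by simp]
      rw [List.range_succ_eq_map]
      simp only [List.map_cons, List.map_map]
      refine List.cons_eq_cons.mpr ⟨?_, ?_⟩
      · simp [PySem.Chars.join, List.intercalate, List.intersperse]
      · rw [← ih, hr, List.map_map, show ∀ (l : List (List Char)), [].append l = l from fun _ => rfl]
        apply List.map_congr_left
        intro k hk
        simp only [Function.comp_apply, Nat.succ_eq_add_one]
        rw [List.take_succ_cons, List.take_succ_cons, pvJoin_nil_cons, ← List.take_succ_cons]
    · obtain ⟨hh, r, hr⟩ : ∃ hh r, pvSplit t = hh :: r := by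
        cases e : pvSplit t with
        | nil => exact absurd e (pvSplit_ne_nil t)
        | cons a b => exact ⟨a, b, rfl⟩
      simp only [pvSplit, hc, if_neg, not_false_eq_true, hr, pvPfx, if_false]
      rw [hr] at ih
      rw [← ih]
      simp only [List.length_cons, List.map_map, List.nil_append]
      apply List.map_congr_left
      intro k hk
      simp only [Function.comp_apply]
      rw [List.take_succ_cons, List.take_succ_cons, pvJoin_cons_head]

theorem pvSlice_pre (p : String) (pre t : List Char) (hp : p.toList = pre ++ t) :
    PySem.Str.slice p none (some (pre.length : Int)) = String.ofList pre := by
  have h3 : (PySem.Str.slice p none (some (pre.length : Int))).toList = pre := by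
    rw [PySem.Str.toList_slice, PySem.Chars.slice_eq_listSlice,
      PySem.List.slice_to _ (by omega), hp]
    simp [List.take_left]
  have h4 := congrArg String.ofList h3
  rwa [String.ofList_toList] at h4

theorem pvScan_eq (t : List Char) : ∀ (pre : List Char) (p : String), p.toList = pre ++ t →
    ∀ (folders : List String),
    (PySem.List.enumerate t (pre.length : Int)).foldl
      (fun fs jc =>
        if jc.2 = '/' then PySem.Set.add fs (PySem.Str.slice p none (some jc.1)) else fs)
      folders
    = ((pvPfx t).map (fun q => String.ofList (pre ++ q))).foldl PySem.Set.add folders := by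
  induction t with
  | nil => intro pre p hp folders; simp [PySem.List.enumerate, pvPfx]
  | cons c t' ih =>
    intro pre p hp folders
    rw [PySem.List.enumerate_cons, List.foldl_cons]
    have hlen : (pre.length : Int) + 1 = ((pre ++ [c]).length : Int) := by push_cast; simp
    have hp' : p.toList = (pre ++ [c]) ++ t' := by simpa [List.append_assoc] using hp
    by_cases hc : c = '/'
    · subst hc
      simp only [if_pos rfl]
      rw [hlen, ih (pre ++ ['/']) p hp']
      simp only [pvPfx, if_pos rfl, List.map_append, List.map_cons, List.map_nil,
        List.map_map, List.foldl_cons]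
      rw [pvSlice_pre p pre _ hp]
      simp [Function.comp_def, List.append_assoc]
    · simp only [if_neg hc]
      rw [hlen, ih (pre ++ [c]) p hp']
      simp only [pvPfx, if_neg hc, List.nil_append, List.map_map]
      simp [Function.comp_def, List.append_assoc]

theorem pvJoinStr (l : List (List Char)) :
    PySem.Str.join "/" (l.map String.ofList) = String.ofList (PySem.Chars.join ['/'] l) := by
  have h : (PySem.Str.join "/" (l.map String.ofList)).toList = PySem.Chars.join ['/'] l := by
    rw [PySem.Str.toList_join]
    have : ("/" : String).toList = ['/'] := by decide
    rw [this]
    congr 1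
    simp [List.map_map, Function.comp_def]
  have h4 := congrArg String.ofList h
  rwa [String.ofList_toList] at h4

theorem pvSlashToList : ("/" : String).toList = ['/'] := by decide

theorem pvChain_eq (rp : String) :
    pvFolderChain rp =
      (pvPfx (PySem.Str.stripChars (PySem.Str.strip rp) "/").toList).map String.ofList := by
  unfold pvFolderChain
  generalize PySem.Str.stripChars (PySem.Str.strip rp) "/" = p
  by_cases hg : p = "" ∨ PySem.Str.isIn "/" p = false
  · rw [if_pos hg]
    rcases hg with hg | hg
    · rw [hg]; simp [pvPfx]
    · have hnot : '/' ∉ p.toList := by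
        intro hmem
        have h5 : PySem.Chars.isIn ['/'] p.toList = true :=
          (PySem.Chars.isIn_iff_infix _ _).mpr ((List.singleton_infix_iff _ _).mpr hmem)
        rw [PySem.Str.isIn_eq, pvSlashToList, h5] at hg
        cases hg
      rw [pvPfx_nil_of_not_mem hnot]; rfl
  · rw [if_neg hg]
    push_neg at hg
    obtain ⟨hne, hin⟩ := hg
    have hin' : '/' ∈ p.toList := by
      rw [Bool.ne_false_iff, PySem.Str.isIn_eq, pvSlashToList,
        PySem.Chars.isIn_iff_infix] at hin
      exact (List.singleton_infix_iff _ _).mp hin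
    have hsegs : (PySem.Str.split? p "/").getD [] = (pvSplit p.toList).map String.ofList := by
      rw [PySem.Str.split?, pvSlashToList, PySem.Chars.split?]
      simp [pvSplitOn_single]
    rw [hsegs]
    have hlen2 : 2 ≤ ((pvSplit p.toList).map String.ofList).length := by
      simpa using pvSplit_two_le hin'
    rw [if_neg (by omega)]
    rw [pvFoldl_append_sing]
    rw [PySem.List.pyRange_one, List.map_map, List.nil_append]
    have hlen3 : ((((pvSplit p.toList).map String.ofList).length : Int) - 1).toNat
        = (pvSplit p.toList).length - 1 := by
      rw [List.length_map]
      have h9 := pvSplit_ne_nil p.toList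
      omega
    rw [hlen3, ← pvRangeJoin_eq_pfx, List.map_map]
    apply List.map_congr_left
    intro k hk
    simp only [Function.comp_apply]
    rw [PySem.List.slice_to _ (by omega)]
    have : ((1 : Int) + (k : Int)).toNat = k + 1 := by omega
    rw [this, ← List.map_take, pvJoinStr]

theorem pvScan_zero (p : String) (folders : List String) :
    (PySem.List.enumerate p.toList).foldl
      (fun fs jc =>
        if jc.2 = '/' then PySem.Set.add fs (PySem.Str.slice p none (some jc.1)) else fs)
      folders
    = ((pvPfx p.toList).map String.ofList).foldl PySem.Set.add folders := by
  have h := pvScan_eq p.toList [] p (by simp) folders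
  simpa using h

theorem pvStripChars_empty (rp : String) (h : PySem.Str.strip rp = "") :
    (PySem.Str.stripChars (PySem.Str.strip rp) "/").toList = [] := by
  rw [PySem.Str.toList_stripChars, h]
  decide

theorem pvStep_eq (rp : String) (folders : List String) :
    (if rp = "/" ∨ PySem.Str.strip rp = "" then folders
     else (pvFolderChain rp).foldl PySem.Set.add folders)
    = (let p := PySem.Str.stripChars (PySem.Str.strip rp) "/"
       (PySem.List.enumerate p.toList).foldl
         (fun fs jc =>
           if jc.2 = '/' then PySem.Set.add fs (PySem.Str.slice p none (some jc.1)) else fs)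
         folders) := by
  simp only []
  rw [pvScan_zero]
  by_cases hg : rp = "/" ∨ PySem.Str.strip rp = ""
  · rw [if_pos hg]
    have hnil : (PySem.Str.stripChars (PySem.Str.strip rp) "/").toList = [] := by
      rcases hg with hg | hg
      · rw [hg]; decide
      · exact pvStripChars_empty rp hg
    rw [hnil]
    rfl
  · rw [if_neg hg, pvChain_eq]

theorem main_spec (paths : List String) :
    collect_parent_directories paths = collect_parent_directories_alt paths := by
  unfold collect_parent_directories collect_parent_directories_alt
  exact List.foldl_ext _ _ _ (fun folders rp _ => pvStep_eq rp folders)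

-- ===== VERDICT (by name: the statement is the Claim_ definition above) =====
theorem collect_parent_directories_spec : Claim_equal_collect_parent_directories := by
  intro paths _
  unfold Spec_collect_parent_directories
  exact main_spec paths
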